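-- pv_equiv track=rewrite | github.com/MTrajK/coding-problems | Arrays/find_el_smaller_left_bigger_right.py | find_element_smaller_left_bigger_right
-- ===== SOURCE A (Python) =====
-- def find_element_smaller_left_bigger_right(arr):
--     n = len(arr)
--     curr_max = arr[0]
--     result = -1
--
--     for i in range(1, n):
--         curr_el = arr[i]
--
--         if result == -1 and curr_el >= curr_max and i != n - 1:
--             result = curr_el
--         elif curr_el < result:
--             result = -1
--
--         if curr_el > curr_max:
--             curr_max = curr_el
--
--     return result
-- ===== SOURCE B (Python) =====
-- def find_element_smaller_left_bigger_right(arr):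
--     if len(arr) < 3:
--         return -1
--     # suffix minima: mins[i] = min(arr[i:])
--     mins = []
--     m = arr[-1]
--     for x in reversed(arr):
--         m = min(m, x)
--         mins.append(m)
--     mins.reverse()
--     curr_max = arr[0]
--     # pair each interior element arr[i] with min(arr[i+1:])
--     for x, s in zip(arr[1:-1], mins[2:]):
--         if curr_max <= x <= s:
--             return x
--         curr_max = max(curr_max, x)
--     return -1
-- ===== Notes on version B (the rewrite author's own statement) =====
-- stated objective: alternative
-- what changed: A tracks a mutable candidate with reset logic in one stateful scan; B precomputes a suffix-minimum table in a backward pass and then does a forward scan that directly tests '>= running prefix max and <= suffix min' with an early return.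
-- outside the precondition, e.g. on find_element_smaller_left_bigger_right([-2, -1, 0, 5, 3]): A returns 0, B returns -1
import Mathlib
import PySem

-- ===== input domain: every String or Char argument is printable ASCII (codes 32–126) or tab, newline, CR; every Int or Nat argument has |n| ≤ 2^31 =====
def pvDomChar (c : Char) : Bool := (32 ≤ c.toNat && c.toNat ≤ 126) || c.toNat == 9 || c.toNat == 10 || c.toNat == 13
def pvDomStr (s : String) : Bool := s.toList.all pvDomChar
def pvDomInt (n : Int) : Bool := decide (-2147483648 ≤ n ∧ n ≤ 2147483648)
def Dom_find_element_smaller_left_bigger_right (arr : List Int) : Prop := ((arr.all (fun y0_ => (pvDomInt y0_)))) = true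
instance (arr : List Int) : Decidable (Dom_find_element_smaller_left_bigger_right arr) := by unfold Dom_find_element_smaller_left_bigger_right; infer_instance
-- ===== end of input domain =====

-- B replaces A's stateful candidate/reset scan by a suffix-minimum table plus a direct
-- forward scan with a running prefix maximum (alternative decomposition, same O(n) cost).

-- ===== PORT A =====
-- the for-loop over range(1, n): the list argument holds the elements at indices i, i+1, …; state (result, curr_max)
def pvLoopA : List Int → Int → Int → Int → Int → Int
  | [], _, _, res, _ => res
  | x :: xs, i, n, res, cmax =>
    pvLoopA xs (i + 1) n
      (if res = -1 ∧ cmax ≤ x ∧ i ≠ n - 1 then x else if x < res then -1 else res)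
      (if cmax < x then x else cmax)

def find_element_smaller_left_bigger_right (arr : List Int) : Int :=
  match arr with
  | [] => 0  -- unreachable under Pre_: Python raises IndexError reading arr[0]
  | a :: rest => pvLoopA rest 1 ((a :: rest).length : Int) (-1) a

-- ===== PORT B =====
-- the backward loop `for x in reversed(arr): m = min(m, x); mins.append(m)`
def pvRevMins : Int → List Int → List Int
  | _, [] => []
  | m, x :: xs => (min m x) :: pvRevMins (min m x) xs

-- the forward loop `for x, s in zip(arr[1:-1], mins[2:]): …` with early return
def pvScanB : Int → List (Int × Int) → Int
  | _, [] => -1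
  | cmax, (x, s) :: rest => if cmax ≤ x ∧ x ≤ s then x else pvScanB (max cmax x) rest

def find_element_smaller_left_bigger_right_alt (arr : List Int) : Int :=
  if arr.length < 3 then -1
  else
    match arr with
    | [] => -1  -- unreachable: length ≥ 3
    | a :: rest =>
      -- m = arr[-1] (arr is nonempty here)
      let m0 := (a :: rest).getLast (by simp)
      let mins := (pvRevMins m0 (a :: rest).reverse).reverse
      pvScanB a (List.zip (PySem.List.slice (a :: rest) (some 1) (some (-1)))
                          (PySem.List.slice mins (some 2) none))

-- ===== PRECONDITION & SPEC =====
-- Pre_ excludes the empty list (A raises IndexError reading arr[0]) and arrays that have an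
-- interior element equal to -1 that is ≥ everything to its left and ≤ everything to its right:
-- there A's -1 'not found' sentinel collides with that equally valid answer and which qualifying
-- value is returned is an accident of the sentinel (both answers are defensible).
def Pre_find_element_smaller_left_bigger_right (arr : List Int) : Prop :=
  arr ≠ [] ∧ ∀ i ∈ List.range arr.length, 1 ≤ i → i + 1 < arr.length → arr.getD i 0 = -1 →
    ¬((∀ y ∈ arr.take i, y ≤ -1) ∧ (∀ y ∈ arr.drop (i + 1), -1 ≤ y))
instance (arr : List Int) : Decidable (Pre_find_element_smaller_left_bigger_right arr) := by
  unfold Pre_find_element_smaller_left_bigger_right; infer_instance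

def pvWitness_find_element_smaller_left_bigger_right : List Int := [1, 2, 3]

def Spec_find_element_smaller_left_bigger_right (arr : List Int) (out : Int) : Prop :=
  out = find_element_smaller_left_bigger_right_alt arr
instance (arr : List Int) (out : Int) : Decidable (Spec_find_element_smaller_left_bigger_right arr out) := by
  unfold Spec_find_element_smaller_left_bigger_right; infer_instance

-- ===== CLAIM (what is proved, stated in full; the proofs are below) =====
def Claim_equal_find_element_smaller_left_bigger_right : Prop :=
  ∀ (arr : List Int), Dom_find_element_smaller_left_bigger_right arr →
    Pre_find_element_smaller_left_bigger_right arr →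
    Spec_find_element_smaller_left_bigger_right arr (find_element_smaller_left_bigger_right arr)

-- ===== LEMMAS AND PROOFS =====

-- min of a nonempty list (the [] value is never used)
def pvMinL : List Int → Int
  | [] => 0
  | x :: xs => xs.foldl min x

-- common specification: first interior element ≥ running max of the left and ≤ min of the right
def pvK : Int → List Int → Int
  | _, [] => -1
  | _, [_] => -1
  | cmax, x :: y :: xs => if cmax ≤ x ∧ x ≤ pvMinL (y :: xs) then x else pvK (max cmax x) (y :: xs)

-- A's loop with the index test i ≠ n-1 replaced by "the suffix is nonempty"
def pvG : List Int → Int → Int → Int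
  | [], res, _ => res
  | x :: xs, res, cmax =>
    pvG xs (if res = -1 ∧ cmax ≤ x ∧ xs ≠ [] then x else if x < res then -1 else res) (max cmax x)

-- "no qualifying interior element equals -1", threaded along A's scan
def pvNom : List Int → Int → Prop
  | [], _ => True
  | x :: xs, cmax => ((cmax ≤ x ∧ xs ≠ [] ∧ ∀ y ∈ xs, x ≤ y) → x ≠ -1) ∧ pvNom xs (max cmax x)

-- structural suffix minima: pvSM l = [pvMinL l, pvMinL l.tail, …]
def pvSM : List Int → List Int
  | [] => []
  | x :: xs => pvMinL (x :: xs) :: pvSM xs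

theorem pvG_cons (x : Int) (xs : List Int) (res cmax : Int) :
    pvG (x :: xs) res cmax =
      pvG xs (if res = -1 ∧ cmax ≤ x ∧ xs ≠ [] then x else if x < res then -1 else res) (max cmax x) := rfl

theorem pvK_cons2 (cmax x y : Int) (t : List Int) :
    pvK cmax (x :: y :: t) =
      if cmax ≤ x ∧ x ≤ pvMinL (y :: t) then x else pvK (max cmax x) (y :: t) := rfl

theorem pv_foldl_min_le_init (xs : List Int) (a : Int) : xs.foldl min a ≤ a := by
  induction xs generalizing a with
  | nil => simp
  | cons x t ih => exact le_trans (ih (min a x)) (min_le_left _ _)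

theorem pv_foldl_min_le_mem (xs : List Int) (a y : Int) (hy : y ∈ xs) : xs.foldl min a ≤ y := by
  induction xs generalizing a with
  | nil => cases hy
  | cons x t ih =>
    rcases List.mem_cons.1 hy with rfl | hy'
    · exact le_trans (pv_foldl_min_le_init t (min a y)) (min_le_right _ _)
    · exact ih _ hy'

theorem pv_le_foldl_min (xs : List Int) (a c : Int) (h1 : c ≤ a) (h2 : ∀ y ∈ xs, c ≤ y) :
    c ≤ xs.foldl min a := by
  induction xs generalizing a with
  | nil => simpa using h1
  | cons x t ih =>
    exact ih (min a x) (le_min h1 (h2 x (List.mem_cons_self))) fun y hy => h2 y (List.mem_cons_of_mem _ hy)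

theorem pv_foldl_min_reverse (xs : List Int) (a : Int) : xs.reverse.foldl min a = xs.foldl min a := by
  apply le_antisymm
  · exact pv_le_foldl_min _ _ _ (pv_foldl_min_le_init _ _)
      (fun y hy => pv_foldl_min_le_mem _ _ _ (by simpa using hy))
  · exact pv_le_foldl_min _ _ _ (pv_foldl_min_le_init _ _)
      (fun y hy => pv_foldl_min_le_mem _ _ _ (by simpa using hy))

theorem pv_le_pvMinL (x y : Int) (t : List Int) :
    x ≤ pvMinL (y :: t) ↔ ∀ z ∈ y :: t, x ≤ z := by
  constructor
  · intro h z hz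
    rcases List.mem_cons.1 hz with rfl | hz'
    · exact le_trans h (pv_foldl_min_le_init t z)
    · exact le_trans h (pv_foldl_min_le_mem t y z hz')
  · intro h
    exact pv_le_foldl_min t y x (h y List.mem_cons_self) fun z hz => h z (List.mem_cons_of_mem _ hz)

theorem pv_pvMinL_le_mem (y : Int) (t : List Int) (z : Int) (hz : z ∈ y :: t) :
    pvMinL (y :: t) ≤ z := by
  rcases List.mem_cons.1 hz with rfl | hz'
  · exact pv_foldl_min_le_init t z
  · exact pv_foldl_min_le_mem t y z hz'

-- alignment: in A's loop, i = n-1 exactly when the current element is the last one,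
-- and `if cmax < x then x else cmax` is `max cmax x`
theorem pv_loopA_eq_G (rest : List Int) :
    ∀ (i n res cmax : Int), i + rest.length = n →
      pvLoopA rest i n res cmax = pvG rest res cmax := by
  induction rest with
  | nil => intro i n res cmax _; rfl
  | cons x xs ih =>
    intro i n res cmax h
    simp only [List.length_cons] at h
    have hlen : i + ((xs.length : Int) + 1) = n := by push_cast at h ⊢; omega
    have hiff : (i ≠ n - 1) ↔ xs ≠ [] := by
      constructor
      · intro hne hxe
        apply hne
        subst hxe
        simp only [List.length_nil, Nat.cast_zero] at hlen
        omega
      · intro hxe hie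
        apply hxe
        have : (xs.length : Int) = 0 := by omega
        exact List.eq_nil_of_length_eq_zero (by exact_mod_cast this)
    have hcond : (res = -1 ∧ cmax ≤ x ∧ i ≠ n - 1) ↔ (res = -1 ∧ cmax ≤ x ∧ xs ≠ []) := by
      rw [hiff]
    have hmax : (if cmax < x then x else cmax) = max cmax x := by
      by_cases hx : cmax < x
      · rw [if_pos hx, max_eq_right hx.le]
      · rw [if_neg hx, max_eq_left (not_lt.1 hx)]
    show pvLoopA xs (i + 1) n _ _ = pvG xs _ _
    rw [ih (i + 1) n _ _ (by omega), hmax, if_congr hcond rfl rfl]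

theorem pv_G_keep (rest : List Int) :
    ∀ res cmax, res ≠ -1 → (∀ y ∈ rest, res ≤ y) → pvG rest res cmax = res := by
  induction rest with
  | nil => intro res cmax _ _; rfl
  | cons x xs ih =>
    intro res cmax hres hall
    rw [pvG_cons, if_neg (by rintro ⟨h, _⟩; exact hres h),
        if_neg (not_lt.2 (hall x List.mem_cons_self))]
    exact ih res _ hres fun y hy => hall y (List.mem_cons_of_mem _ hy)

-- main invariant: A's loop equals the direct first-qualifying-element search
theorem pv_GK (rest : List Int) :
    (∀ cmax, pvNom rest cmax → pvG rest (-1) cmax = pvK cmax rest) ∧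
    (∀ res cmax, res ≠ -1 → res ≤ cmax → (∃ y ∈ rest, y < res) → pvNom rest cmax →
      pvG rest res cmax = pvK cmax rest) := by
  induction rest with
  | nil =>
    constructor
    · intro cmax _; rfl
    · rintro res cmax _ _ ⟨y, hy, _⟩ _; cases hy
  | cons x xs ih =>
    obtain ⟨ih1, ih2⟩ := ih
    constructor
    · intro cmax hnom
      obtain ⟨h1, h2⟩ := hnom
      cases xs with
      | nil =>
        rw [pvG_cons]
        have hres' : (if (-1 : Int) = -1 ∧ cmax ≤ x ∧ ([] : List Int) ≠ [] then x
            else if x < -1 then -1 else (-1 : Int)) = -1 := by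
          split_ifs with h h'
          · exact absurd rfl h.2.2
          · rfl
          · rfl
        rw [hres']
        rfl
      | cons y t =>
        by_cases hc : cmax ≤ x
        · by_cases hall : ∀ z ∈ y :: t, x ≤ z
          · have hx1 : x ≠ -1 := h1 ⟨hc, by simp, hall⟩
            rw [pvG_cons, pvK_cons2, if_pos ⟨rfl, hc, by simp⟩,
                if_pos ⟨hc, (pv_le_pvMinL x y t).2 hall⟩]
            exact pv_G_keep _ _ _ hx1 hall
          · push_neg at hall
            obtain ⟨z, hz, hzx⟩ := hall
            have hnc : ¬(cmax ≤ x ∧ x ≤ pvMinL (y :: t)) := by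
              rintro ⟨_, hle⟩
              exact absurd (le_trans hle (pv_pvMinL_le_mem y t z hz)) (not_le.2 hzx)
            rw [pvG_cons, pvK_cons2, if_pos ⟨rfl, hc, by simp⟩, if_neg hnc]
            by_cases hx1 : x = -1
            · subst hx1; exact ih1 _ h2
            · exact ih2 x _ hx1 (le_max_right _ _) ⟨z, hz, hzx⟩ h2
        · have hres' : (if (-1 : Int) = -1 ∧ cmax ≤ x ∧ (y :: t) ≠ [] then x
              else if x < -1 then -1 else (-1 : Int)) = -1 := by
            split_ifs with h h'
            · exact absurd h.2.1 hc
            · rfl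
            · rfl
          rw [pvG_cons, hres', pvK_cons2, if_neg (fun h => hc h.1)]
          exact ih1 _ h2
    · rintro res cmax hres hrc ⟨y, hy, hylt⟩ hnom
      obtain ⟨h1, h2⟩ := hnom
      have hres' : (if res = -1 ∧ cmax ≤ x ∧ xs ≠ [] then x
          else if x < res then -1 else res) = (if x < res then -1 else res) :=
        if_neg (fun h => hres h.1)
      by_cases hxr : x < res
      · rw [pvG_cons, hres', if_pos hxr]
        cases xs with
        | nil => rfl
        | cons z t =>
          rw [pvK_cons2,
              if_neg (by rintro ⟨hcx, _⟩; exact absurd (le_trans hrc hcx) (not_le.2 hxr))]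
          exact ih1 _ h2
      · have hy' : y ∈ xs := by
          rcases List.mem_cons.1 hy with rfl | h
          · exact absurd hylt hxr
          · exact h
        rw [pvG_cons, hres', if_neg hxr]
        cases xs with
        | nil => cases hy'
        | cons z t =>
          have hnc : ¬(cmax ≤ x ∧ x ≤ pvMinL (z :: t)) := by
            rintro ⟨hcx, hle⟩
            exact absurd (lt_of_lt_of_le hylt (le_trans hrc hcx))
              (not_lt.2 (le_trans hle (pv_pvMinL_le_mem z t y hy')))
          rw [pvK_cons2, if_neg hnc]
          exact ih2 res _ hres (le_trans hrc (le_max_left _ _)) ⟨y, hy', hylt⟩ h2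

-- suffix-minima construction equals the structural suffix minima
theorem pv_revMins_append (l : List Int) (m y : Int) :
    pvRevMins m (l ++ [y]) = pvRevMins m l ++ [min (l.foldl min m) y] := by
  induction l generalizing m with
  | nil => rfl
  | cons x t ih => simp only [List.cons_append, pvRevMins, ih, List.foldl_cons]

theorem pv_revMins_reverse (arr : List Int) (m : Int) (hm : arr = [] ∨ arr.getLast? = some m) :
    (pvRevMins m arr.reverse).reverse = pvSM arr := by
  induction arr with
  | nil => rfl
  | cons x xs ih =>
    cases xs with
    | nil =>
      rcases hm with h | h
      · cases h
      · simp only [List.getLast?_singleton, Option.some.injEq] at h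
        subst h
        simp [pvRevMins, pvSM, pvMinL]
    | cons z t =>
      have hm' : z :: t = [] ∨ (z :: t).getLast? = some m := by
        rcases hm with h | h
        · cases h
        · right; rwa [List.getLast?_cons_cons] at h
      have hmem : m ∈ z :: t := by
        rcases hm' with h | h
        · cases h
        · exact List.mem_of_getLast? h
      have hrev : (x :: z :: t).reverse = (z :: t).reverse ++ [x] :=
        List.reverse_cons ..
      rw [hrev, pv_revMins_append, List.reverse_append, List.reverse_singleton,
        List.singleton_append, ih hm', pv_foldl_min_reverse]
      show min ((z :: t).foldl min m) x :: pvSM (z :: t) = pvMinL (x :: z :: t) :: pvSM (z :: t)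
      congr 1
      -- min (min over (z :: t) seeded m) x = min over (x :: z :: t), using m ∈ z :: t
      have hF_le : ∀ w ∈ z :: t, (z :: t).foldl min m ≤ w := by
        intro w hw
        rcases List.mem_cons.1 hw with rfl | hw'
        · exact le_trans (pv_foldl_min_le_init t (min m w)) (min_le_right _ _)
        · exact pv_foldl_min_le_mem t (min m z) w hw'
      have hG_le : ∀ w ∈ z :: t, pvMinL (x :: z :: t) ≤ w := by
        intro w hw
        show (z :: t).foldl min x ≤ w
        rcases List.mem_cons.1 hw with rfl | hw'
        · exact le_trans (pv_foldl_min_le_init t (min x w)) (min_le_right _ _)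
        · exact pv_foldl_min_le_mem t (min x z) w hw'
      apply le_antisymm
      · show min ((z :: t).foldl min m) x ≤ (z :: t).foldl min x
        apply pv_le_foldl_min
        · exact min_le_right _ _
        · intro w hw
          exact le_trans (min_le_left _ _) (hF_le w hw)
      · show pvMinL (x :: z :: t) ≤ min ((z :: t).foldl min m) x
        apply le_min
        · apply pv_le_foldl_min
          · exact hG_le m hmem
          · intro w hw
            exact hG_le w hw
        · exact pv_foldl_min_le_init (z :: t) x

-- B's zipped forward scan equals the first-qualifying-element search
theorem pv_scan_eq_K (rest : List Int) :
    ∀ cmax, pvScanB cmax (rest.dropLast.zip ((pvSM rest).drop 1)) = pvK cmax rest := by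
  induction rest with
  | nil => intro cmax; rfl
  | cons x xs ih =>
    intro cmax
    cases xs with
    | nil => rfl
    | cons y t =>
      show (if cmax ≤ x ∧ x ≤ pvMinL (y :: t) then x
            else pvScanB (max cmax x) ((y :: t).dropLast.zip ((pvSM (y :: t)).drop 1))) =
        pvK cmax (x :: y :: t)
      rw [pvK_cons2, ih (max cmax x)]

-- port B computes the first-qualifying-element search
theorem pv_alt_eq_K (a : Int) (rest : List Int) :
    find_element_smaller_left_bigger_right_alt (a :: rest) = pvK a rest := by
  by_cases hlt : (a :: rest).length < 3
  · rw [find_element_smaller_left_bigger_right_alt, if_pos hlt]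
    cases rest with
    | nil => rfl
    | cons b s =>
      cases s with
      | nil => rfl
      | cons c t => exact absurd hlt (by simp)
  · rw [find_element_smaller_left_bigger_right_alt, if_neg hlt]
    show pvScanB a (List.zip (PySem.List.slice (a :: rest) (some 1) (some (-1)))
      (PySem.List.slice ((pvRevMins ((a :: rest).getLast (by simp)) (a :: rest).reverse).reverse)
        (some 2) none)) = pvK a rest
    have h1 : PySem.List.slice (a :: rest) (some 1) (some (-1)) = rest.dropLast := by
      simp [PySem.List.slice, List.dropLast_eq_take]
    have h2 : (pvRevMins ((a :: rest).getLast (by simp)) (a :: rest).reverse).reverse =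
        pvSM (a :: rest) :=
      pv_revMins_reverse _ _ (Or.inr (List.getLast?_eq_some_getLast (by simp)))
    have h3 : PySem.List.slice (pvSM (a :: rest)) (some 2) none = (pvSM (a :: rest)).drop 2 := by
      simp [pysem]
    rw [h1, h2, h3]
    show pvScanB a (rest.dropLast.zip ((pvSM rest).drop 1)) = pvK a rest
    exact pv_scan_eq_K rest a

-- the -1-sentinel precondition implies the threaded no-(-1)-candidate property
theorem pv_pre_nom (rest : List Int) :
    ∀ (p : List Int) (cmax : Int) (arr : List Int), arr = p ++ rest → p ≠ [] →
      (∀ y ∈ p, y ≤ cmax) →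
      (∀ i ∈ List.range arr.length, 1 ≤ i → i + 1 < arr.length → arr.getD i 0 = -1 →
        ¬((∀ y ∈ arr.take i, y ≤ -1) ∧ (∀ y ∈ arr.drop (i + 1), -1 ≤ y))) →
      pvNom rest cmax := by
  induction rest with
  | nil => intro p cmax arr _ _ _ _; trivial
  | cons x xs ih =>
    intro p cmax arr harr hp hple hpre
    subst harr
    constructor
    · rintro ⟨hcx, hxs, hall⟩ hx1
      subst hx1
      have hi1 : 1 ≤ p.length := List.length_pos_iff.2 hp
      have hxs' : 0 < xs.length := List.length_pos_iff.2 hxs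
      have hlen : (p ++ (-1) :: xs).length = p.length + 1 + xs.length := by
        simp [List.length_append]; omega
      refine hpre p.length (List.mem_range.2 (by omega)) hi1 (by omega) ?_ ⟨?_, ?_⟩
      · show (p ++ (-1) :: xs).getD p.length 0 = -1
        simp [List.getD]
      · intro y hy
        rw [List.take_left] at hy
        exact le_trans (hple y hy) hcx
      · intro y hy
        have hd : (p ++ (-1) :: xs).drop (p.length + 1) = xs := by
          simp [List.drop_append]
        rw [hd] at hy
        exact hall y hy
    · exact ih (p ++ [x]) (max cmax x) (p ++ x :: xs) (by simp) (by simp)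
        (by
          intro y hy
          rcases List.mem_append.1 hy with h | h
          · exact le_trans (hple y h) (le_max_left _ _)
          · simp only [List.mem_singleton] at h
            subst h
            exact le_max_right _ _)
        hpre

-- ===== VERDICT (by name: the statement is the Claim_ definition above) =====
theorem find_element_smaller_left_bigger_right_spec : Claim_equal_find_element_smaller_left_bigger_right := by
  intro arr _ hpre
  obtain ⟨hne, hbody⟩ := hpre
  unfold Spec_find_element_smaller_left_bigger_right
  cases arr with
  | nil => exact absurd rfl hne
  | cons a rest =>
    show pvLoopA rest 1 ((a :: rest).length : Int) (-1) a = _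
    rw [pv_loopA_eq_G rest 1 _ _ _ (by simp; omega),
        (pv_GK rest).1 a (pv_pre_nom rest [a] a (a :: rest) rfl (by simp) (by simp) hbody),
        pv_alt_eq_K a rest]
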